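-- pv_equiv track=rewrite | github.com/joshanashakya/dissertation | workspace/dataset/java-python/GeeksForGeeks/4101/A/2.py | maxPartition
-- ===== SOURCE A (Python) =====
-- def maxPartition(s):
--
--     # P will store the answer
--     n = len(s)
--     P = 0
--
--     # Current will store current string
--     # Previous will store the previous
--     # that has been taken already
--     current = ""
--     previous = ""
--
--     for i in range(n):
--
--         # Add a character to current string
--         current += s[i]
--
--         if (current != previous):
--
--             # Here we will create a partition and
--             # update the previous with
--             # current string
--             previous = current
--
--             # Now we will clear the current string
--             current = ""
--
--             # Increment the count of partition.
--             P += 1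
--
--     return P
-- ===== SOURCE B (Python) =====
-- def maxPartition(s):
--     # Index walk keeping only the last committed piece (length 1 or 2); stride 1 or 2.
--     n = len(s)
--     i = 0
--     prev = ""
--     count = 0
--     while i < n:
--         if prev == s[i]:
--             # the single char would repeat the previous length-1 partition
--             if i + 1 < n:
--                 prev = s[i:i + 2]
--                 i += 2
--                 count += 1
--             else:
--                 break  # lone trailing char equal to prev: never committed
--         else:
--             prev = s[i]
--             i += 1
--             count += 1
--     return count
-- ===== Notes on version B (the rewrite author's own statement) =====
-- stated objective: alternative
-- what changed: Replaces A's growing current-string buffer and per-character fold with an index walk of stride 1 or 2 that keeps only the last committed piece, never concatenating a buffer.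
import Mathlib
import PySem

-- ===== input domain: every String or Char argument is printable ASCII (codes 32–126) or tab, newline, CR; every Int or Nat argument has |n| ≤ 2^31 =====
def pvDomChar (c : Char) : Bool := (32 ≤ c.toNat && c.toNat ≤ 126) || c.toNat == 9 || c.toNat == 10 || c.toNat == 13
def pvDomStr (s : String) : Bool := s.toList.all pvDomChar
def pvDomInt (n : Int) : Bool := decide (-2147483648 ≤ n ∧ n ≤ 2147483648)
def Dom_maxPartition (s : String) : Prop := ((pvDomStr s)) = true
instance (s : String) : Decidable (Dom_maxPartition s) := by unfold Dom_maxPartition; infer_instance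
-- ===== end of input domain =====

-- B replaces A's growing current-string buffer with a stride-1/2 index walk keeping
-- only the last committed piece; equivalence of the return value is proved (alternative decomposition).

-- ===== PORT A =====
-- A's loop state: (current, previous, P); strings carried as List Char, '+=' is append.
def pvStepA : (List Char × List Char × Int) → Char → (List Char × List Char × Int)
  | (cur, prev, p), c =>
    let cur' := cur ++ [c]
    if cur' ≠ prev then ([], cur', p + 1) else (cur', prev, p)

def maxPartition (s : String) : Int :=
  (s.toList.foldl pvStepA ([], [], 0)).2.2

-- ===== PORT B =====
-- B's while-loop: remaining suffix stands for index i; prev is the last committed piece.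
def pvWalkB : List Char → List Char → Int → Int
  | [], _, cnt => cnt
  | c :: rest, prev, cnt =>
    if prev = [c] then
      match rest with
      | [] => cnt                                   -- lone trailing char equal to prev: dropped
      | d :: rest' => pvWalkB rest' [c, d] (cnt + 1) -- commit s[i:i+2], i += 2
    else
      pvWalkB rest [c] (cnt + 1)                     -- commit s[i], i += 1

def maxPartition_alt (s : String) : Int :=
  pvWalkB s.toList [] 0

-- ===== PRECONDITION & SPEC =====
def Spec_maxPartition (s : String) (out : Int) : Prop := out = maxPartition_alt s
instance (s : String) (out : Int) : Decidable (Spec_maxPartition s out) := by unfold Spec_maxPartition; infer_instance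

-- ===== CLAIM (what is proved, stated in full; the proofs are below) =====
def Claim_equal_maxPartition : Prop := ∀ (s : String), Dom_maxPartition s → Spec_maxPartition s (maxPartition s)

-- ===== LEMMAS AND PROOFS =====

-- From a boundary state (empty current buffer) A's fold computes exactly B's walk,
-- for ANY previous piece: proved by strong induction on the length of the remaining input.
theorem pvFold_eq_walk : ∀ (n : Nat) (l : List Char), l.length ≤ n →
    ∀ (prev : List Char) (p : Int),
      (l.foldl pvStepA ([], prev, p)).2.2 = pvWalkB l prev p := by
  intro n
  induction n with
  | zero =>
    intro l hl prev p
    have : l = [] := List.eq_nil_of_length_eq_zero (Nat.le_zero.mp hl)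
    subst this; simp [pvWalkB]
  | succ n ih =>
    intro l hl prev p
    cases l with
    | nil => simp [pvWalkB]
    | cons c rest =>
      by_cases hc : prev = [c]
      · subst hc
        cases rest with
        | nil =>
          simp [pvWalkB, pvStepA]
        | cons d rest' =>
          have h2 : ([c] ++ [d] : List Char) ≠ [c] := by simp
          have hlen : rest'.length ≤ n := by
            simp [List.length_cons] at hl; omega
          calc ((c :: d :: rest').foldl pvStepA ([], [c], p)).2.2
              = (rest'.foldl pvStepA ([], [c, d], p + 1)).2.2 := by
                simp [List.foldl_cons, pvStepA]
            _ = pvWalkB rest' [c, d] (p + 1) := ih rest' hlen _ _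
            _ = pvWalkB (c :: d :: rest') [c] p := by simp [pvWalkB]
      · have h1 : (([] : List Char) ++ [c]) ≠ prev := by
          simpa using fun h => hc h.symm
        have hlen : rest.length ≤ n := by
          simp [List.length_cons] at hl; omega
        calc ((c :: rest).foldl pvStepA ([], prev, p)).2.2
            = (rest.foldl pvStepA ([], [c], p + 1)).2.2 := by
              simp [List.foldl_cons, pvStepA, Ne.symm hc]
          _ = pvWalkB rest [c] (p + 1) := ih rest hlen _ _
          _ = pvWalkB (c :: rest) prev p := by cases rest <;> simp [pvWalkB, hc]

-- ===== VERDICT (by name: the statement is the Claim_ definition above) =====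
theorem maxPartition_spec : Claim_equal_maxPartition := by
  intro s _
  unfold Spec_maxPartition maxPartition maxPartition_alt
  exact pvFold_eq_walk s.toList.length s.toList (le_refl _) [] 0
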